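-- pv_equiv track=rewrite | github.com/woodong27/SWEA | Feb.4rd_week/1226(미로1).py | bfs
-- ===== SOURCE A (Python) =====
-- from collections import deque
--
-- di=[-1,1,0,0]
--
-- dj=[0,0,-1,1]
--
-- def bfs(si,sj,gi,gj,lst):
--     que=deque([])
--     que.append((si,sj))
--     visited=[[0 for _ in range(16)]for _ in range(16)]
--     while que:
--         ci,cj=que.popleft()
--         if ci==gi and cj==gj:
--             return 1
--         visited[ci][cj]=1
--         for k in range(4):
--             if 0<=ci+di[k]<16 and 0<=cj+dj[k]<16:
--                 ni,nj=ci+di[k],cj+dj[k]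
--                 if not visited[ni][nj] and lst[ni][nj]!='1':
--                     que.append((ni,nj))
--
--     return 0
-- ===== SOURCE B (Python) =====
-- def bfs(si, sj, gi, gj, lst):
--     if si == gi and sj == gj:
--         return 1
--     visited = [[0] * 16 for _ in range(16)]
--     def dfs(i, j):
--         visited[i][j] = 1
--         if i == gi and j == gj:
--             return True
--         for di_, dj_ in ((-1, 0), (1, 0), (0, -1), (0, 1)):
--             ni, nj = i + di_, j + dj_
--             if 0 <= ni < 16 and 0 <= nj < 16 and not visited[ni][nj] and lst[ni][nj] != '1':
--                 if dfs(ni, nj):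
--                     return True
--         return False
--     return 1 if dfs(si, sj) else 0
-- ===== Notes on version B (the rewrite author's own statement) =====
-- stated objective: faster
-- what changed: Replaces the mark-on-pop BFS queue (which re-enqueues duplicate frontier entries exponentially) with a recursive DFS flood fill that marks each cell on entry and visits it at most once, after an up-front start==goal check.
-- outside the precondition, e.g. on bfs(-1, 0, 5, 5, [['0', '1'], ['1', '1']]): A returns 0, B returns 0; on bfs(0, 0, 3, 3, [['0', '0', '1'], ['1', '1', '1']]): A returns 0, B returns 0
import Mathlib
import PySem

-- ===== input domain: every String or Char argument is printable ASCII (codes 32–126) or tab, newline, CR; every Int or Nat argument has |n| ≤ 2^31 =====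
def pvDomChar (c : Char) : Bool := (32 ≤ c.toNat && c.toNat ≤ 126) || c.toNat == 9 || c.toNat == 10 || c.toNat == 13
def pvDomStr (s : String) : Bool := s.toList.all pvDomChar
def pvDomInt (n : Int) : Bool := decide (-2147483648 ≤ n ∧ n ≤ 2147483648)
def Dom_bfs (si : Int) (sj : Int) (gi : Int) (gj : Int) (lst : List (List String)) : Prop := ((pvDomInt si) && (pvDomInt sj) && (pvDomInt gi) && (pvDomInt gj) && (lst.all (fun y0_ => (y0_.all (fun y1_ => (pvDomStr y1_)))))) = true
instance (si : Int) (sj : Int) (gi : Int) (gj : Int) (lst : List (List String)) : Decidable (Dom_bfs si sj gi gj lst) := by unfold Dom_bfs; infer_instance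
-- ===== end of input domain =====

-- B replaces A's mark-on-pop BFS queue (whose duplicate frontier entries multiply) by a recursive
-- DFS flood fill that visits each cell at most once, after an up-front start==goal check.

-- ===== PORT A =====
-- Helpers shared by both ports (both Pythons use the same 16×16 visited grid and the same
-- bounds-checked reads of `lst`; all these accesses are in-range non-negative indices on the
-- inputs admitted by Pre_bfs, where the ports are exact — out of range, `vget`/`cellD` return
-- the harmless defaults 1 / "1" instead of Python's IndexError/negative wraparound, which
-- Pre_bfs excludes).
def inb (i j : Int) : Bool := decide (0 ≤ i ∧ i < 16 ∧ 0 ≤ j ∧ j < 16)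

def vget (v : List (List Int)) (i j : Int) : Int :=
  if 0 ≤ i ∧ 0 ≤ j then (v.getD i.toNat []).getD j.toNat 1 else 1

def vset (v : List (List Int)) (i j : Int) : List (List Int) :=
  if inb i j then v.set i.toNat ((v.getD i.toNat []).set j.toNat 1) else v

def cellD (lst : List (List String)) (i j : Int) : String :=
  if 0 ≤ i ∧ 0 ≤ j then (lst.getD i.toNat []).getD j.toNat "1" else "1"

def initV : List (List Int) := List.replicate 16 (List.replicate 16 0)

-- module-level constants of A
def diA : List Int := [-1, 1, 0, 0]
def djA : List Int := [0, 0, -1, 1]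

-- measure helpers for the termination of A's while-loop (the loop terminates because each
-- iteration either visits a fresh cell or strictly shrinks the weighted queue)
def ucount (v : List (List Int)) : Nat := (v.map (fun r => r.count 0)).sum
def wt (v : List (List Int)) (e : Int × Int) : Nat :=
  if inb e.1 e.2 ∧ vget v e.1 e.2 = 0 then 1 else 5
def wsum (v : List (List Int)) (que : List (Int × Int)) : Nat := (que.map (wt v)).sum

-- lemmas cited by `decreasing_by` of the port (required above the definition)
theorem pv_set_oob {α : Type} : ∀ (l : List α) (n : Nat) (a : α), l.length ≤ n → l.set n a = l := by
  intro l
  induction l with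
  | nil => intro n a _; rfl
  | cons x xs ih =>
    intro n a h
    cases n with
    | zero => simp at h
    | succ m => simp only [List.set_cons_succ]; rw [ih m a (by simpa using h)]

theorem pv_count0_set_lt : ∀ (l : List Int) (m : Nat), l.getD m 1 = 0 → (l.set m 1).count 0 < l.count 0 := by
  intro l
  induction l with
  | nil => intro m h; simp [List.getD] at h
  | cons x xs ih =>
    intro m h
    cases m with
    | zero =>
      simp only [List.getD_cons_zero] at h
      subst h
      simp only [List.set_cons_zero, List.count_cons]
      simp
    | succ k =>
      simp only [List.getD_cons_succ] at h
      simp only [List.set_cons_succ, List.count_cons]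
      have := ih k h
      omega

theorem pv_sum_map_set (f : List Int → Nat) :
    ∀ (v : List (List Int)) (n : Nat) (r' : List Int), n < v.length →
      ((v.set n r').map f).sum + f (v.getD n []) = (v.map f).sum + f r' := by
  intro v
  induction v with
  | nil => intro n r' h; simp at h
  | cons x xs ih =>
    intro n r' h
    cases n with
    | zero => simp only [List.set_cons_zero, List.map_cons, List.sum_cons, List.getD_cons_zero]; omega
    | succ m =>
      simp only [List.set_cons_succ, List.map_cons, List.sum_cons, List.getD_cons_succ]
      have := ih m r' (by simpa using h)
      omega

theorem ucount_vset_lt (v : List (List Int)) (i j : Int)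
    (hb : inb i j = true) (h0 : vget v i j = 0) : ucount (vset v i j) < ucount v := by
  have hb' : 0 ≤ i ∧ i < 16 ∧ 0 ≤ j ∧ j < 16 := by simpa [inb] using hb
  unfold vget at h0
  rw [if_pos ⟨hb'.1, hb'.2.2.1⟩] at h0
  have hn : i.toNat < v.length := by
    by_contra hc
    have hrow0 : v.getD i.toNat ([] : List Int) = [] := by
      rw [List.getD_eq_getElem?_getD, List.getElem?_eq_none (by omega)]; rfl
    rw [hrow0] at h0
    simp [List.getD] at h0
  unfold vset
  rw [if_pos hb]
  have h := pv_sum_map_set (fun r => r.count 0) v i.toNat ((v.getD i.toNat []).set j.toNat 1) hn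
  have h2 := pv_count0_set_lt (v.getD i.toNat []) j.toNat h0
  unfold ucount
  beta_reduce at h
  omega

theorem vget_vset_self (v : List (List Int)) (i j : Int) (hb : inb i j = true) :
    vget (vset v i j) i j = 1 := by
  have hb' : 0 ≤ i ∧ i < 16 ∧ 0 ≤ j ∧ j < 16 := by simpa [inb] using hb
  unfold vset
  rw [if_pos hb]
  unfold vget
  rw [if_pos ⟨hb'.1, hb'.2.2.1⟩]
  by_cases hn : i.toNat < v.length
  · have hX : (v.set i.toNat ((v.getD i.toNat []).set j.toNat 1)).getD i.toNat ([] : List Int)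
        = (v.getD i.toNat []).set j.toNat 1 := by
      rw [List.getD_eq_getElem?_getD, List.getElem?_set_self (by omega)]; rfl
    rw [hX]
    by_cases hm : j.toNat < (v.getD i.toNat []).length
    · rw [List.getD_eq_getElem?_getD, List.getElem?_set_self (by omega)]; rfl
    · rw [pv_set_oob _ _ _ (by omega), List.getD_eq_getElem?_getD,
        List.getElem?_eq_none (by omega)]; rfl
  · have hrow0 : (v.set i.toNat ((v.getD i.toNat []).set j.toNat 1)).getD i.toNat ([] : List Int)
        = [] := by
      rw [List.getD_eq_getElem?_getD, List.getElem?_eq_none (by simp; omega)]; rfl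
    rw [hrow0]; rfl

theorem vget_vset_ne (v : List (List Int)) (i j a b : Int)
    (ha : 0 ≤ a) (hb2 : 0 ≤ b) (hne : ¬(a = i ∧ b = j)) :
    vget (vset v i j) a b = vget v a b := by
  unfold vset
  split
  · rename_i hg
    have hg' : 0 ≤ i ∧ i < 16 ∧ 0 ≤ j ∧ j < 16 := by simpa [inb] using hg
    unfold vget
    rw [if_pos ⟨ha, hb2⟩, if_pos ⟨ha, hb2⟩]
    by_cases hai : a = i
    · have hbj : b ≠ j := fun h => hne ⟨hai, h⟩
      subst hai
      by_cases hn : a.toNat < v.length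
      · have hX : (v.set a.toNat ((v.getD a.toNat []).set j.toNat 1)).getD a.toNat ([] : List Int)
            = (v.getD a.toNat []).set j.toNat 1 := by
          rw [List.getD_eq_getElem?_getD, List.getElem?_set_self (by omega)]; rfl
        rw [hX]
        simp only [List.getD_eq_getElem?_getD]
        rw [List.getElem?_set_ne (by omega)]
      · rw [pv_set_oob v a.toNat _ (by omega)]
    · have hX : (v.set i.toNat ((v.getD i.toNat []).set j.toNat 1)).getD a.toNat ([] : List Int)
          = v.getD a.toNat [] := by
        rw [List.getD_eq_getElem?_getD, List.getElem?_set_ne (by omega),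
          List.getD_eq_getElem?_getD]
      rw [hX]
  · rfl

theorem pv_count0_set_eq : ∀ (l : List Int) (m : Nat), l.getD m 1 ≠ 0 →
    (l.set m 1).count 0 = l.count 0 := by
  intro l
  induction l with
  | nil => intro m _; rfl
  | cons x xs ih =>
    intro m h
    cases m with
    | zero =>
      simp only [List.getD_cons_zero] at h
      simp [List.set_cons_zero, h]
    | succ k =>
      simp only [List.getD_cons_succ] at h
      simp only [List.set_cons_succ, List.count_cons, ih k h]

theorem wt_vset_eq (v : List (List Int)) (i j : Int) (h : ¬(inb i j = true ∧ vget v i j = 0)) :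
    ∀ e, wt (vset v i j) e = wt v e := by
  intro e
  by_cases hbij : inb i j = true
  · have hv : vget v i j ≠ 0 := fun h0 => h ⟨hbij, h0⟩
    unfold wt
    by_cases hbe : inb e.1 e.2 = true
    · have hbe' : 0 ≤ e.1 ∧ e.1 < 16 ∧ 0 ≤ e.2 ∧ e.2 < 16 := by simpa [inb] using hbe
      by_cases heq : e.1 = i ∧ e.2 = j
      · obtain ⟨h1, h2⟩ := heq
        subst h1; subst h2
        rw [if_neg (show ¬(inb e.1 e.2 = true ∧ vget (vset v e.1 e.2) e.1 e.2 = 0) from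
          fun hc => by rw [vget_vset_self v e.1 e.2 hbij] at hc; exact one_ne_zero hc.2)]
        rw [if_neg (fun hc => hv hc.2)]
      · rw [vget_vset_ne v i j e.1 e.2 hbe'.1 hbe'.2.2.1 heq]
    · rw [if_neg (fun hc => hbe hc.1), if_neg (fun hc => hbe hc.1)]
  · unfold vset
    rw [if_neg hbij]

theorem ucount_vset_eq (v : List (List Int)) (i j : Int)
    (h : ¬(inb i j = true ∧ vget v i j = 0)) : ucount (vset v i j) = ucount v := by
  by_cases hbij : inb i j = true
  · have hv : vget v i j ≠ 0 := fun h0 => h ⟨hbij, h0⟩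
    have hb' : 0 ≤ i ∧ i < 16 ∧ 0 ≤ j ∧ j < 16 := by simpa [inb] using hbij
    unfold vget at hv
    rw [if_pos ⟨hb'.1, hb'.2.2.1⟩] at hv
    unfold vset
    rw [if_pos hbij]
    by_cases hn : i.toNat < v.length
    · have h1 := pv_sum_map_set (fun r => r.count 0) v i.toNat ((v.getD i.toNat []).set j.toNat 1) hn
      have h2 := pv_count0_set_eq (v.getD i.toNat []) j.toNat hv
      unfold ucount
      beta_reduce at h1
      omega
    · rw [pv_set_oob v i.toNat _ (by omega)]
  · unfold vset
    rw [if_neg hbij]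

-- the per-iteration enqueue step of A's `for k in range(4)` loop
def pushes (lst : List (List String)) (v2 : List (List Int)) (ci cj : Int) : List (Int × Int) :=
  (List.range 4).filterMap (fun k =>
    if inb (ci + diA.getD k 0) (cj + djA.getD k 0) ∧
        vget v2 (ci + diA.getD k 0) (cj + djA.getD k 0) = 0 ∧
        cellD lst (ci + diA.getD k 0) (cj + djA.getD k 0) ≠ "1"
    then some (ci + diA.getD k 0, cj + djA.getD k 0) else none)

theorem wt_pushes (lst : List (List String)) (v2 : List (List Int)) (ci cj : Int) :
    ∀ p ∈ pushes lst v2 ci cj, wt v2 p = 1 := by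
  intro p hp
  unfold pushes at hp
  rw [List.mem_filterMap] at hp
  obtain ⟨k, _, hk⟩ := hp
  split at hk
  · rename_i hcond
    injection hk with hk2
    subst hk2
    exact if_pos ⟨hcond.1, hcond.2.1⟩
  · simp at hk

theorem wsum_decreases (lst : List (List String)) (v : List (List Int)) (ci cj : Int)
    (rest : List (Int × Int)) (h : ¬(inb ci cj = true ∧ vget v ci cj = 0)) :
    wsum (vset v ci cj) (rest ++ pushes lst (vset v ci cj) ci cj) < wsum v ((ci, cj) :: rest) := by
  unfold wsum
  rw [List.map_append, List.sum_append, List.map_cons, List.sum_cons]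
  have hrest : (rest.map (wt (vset v ci cj))).sum = (rest.map (wt v)).sum := by
    rw [List.map_congr_left (fun e _ => wt_vset_eq v ci cj h e)]
  have hc5 : wt v (ci, cj) = 5 := if_neg h
  have hlen : (pushes lst (vset v ci cj) ci cj).length ≤ 4 := by
    have := List.length_filterMap_le (fun k =>
      if inb (ci + diA.getD k 0) (cj + djA.getD k 0) ∧
          vget (vset v ci cj) (ci + diA.getD k 0) (cj + djA.getD k 0) = 0 ∧
          cellD lst (ci + diA.getD k 0) (cj + djA.getD k 0) ≠ "1"
      then some (ci + diA.getD k 0, cj + djA.getD k 0) else none) (List.range 4)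
    simpa [pushes] using this
  have hpsum : ((pushes lst (vset v ci cj) ci cj).map (wt (vset v ci cj))).sum
      ≤ (pushes lst (vset v ci cj) ci cj).length := by
    have h1 : ∀ x ∈ (pushes lst (vset v ci cj) ci cj).map (wt (vset v ci cj)), x ≤ 1 := by
      intro x hx
      rw [List.mem_map] at hx
      obtain ⟨p, hp, rfl⟩ := hx
      rw [wt_pushes lst (vset v ci cj) ci cj p hp]
    have := List.sum_le_card_nsmul _ 1 h1
    simpa using this
  omega

-- port of A: the while-loop over (queue, visited); terminates because each iteration either
-- visits a fresh cell (ucount drops) or pops a weight-5 entry and pushes at most four weight-1 ones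
def bfsLoop (gi gj : Int) (lst : List (List String)) (que : List (Int × Int))
    (visited : List (List Int)) : Int :=
  match que with
  | [] => 0
  | (ci, cj) :: rest =>
    if ci = gi ∧ cj = gj then 1
    else
      bfsLoop gi gj lst (rest ++ pushes lst (vset visited ci cj) ci cj) (vset visited ci cj)
termination_by (ucount visited, wsum visited que)
decreasing_by
  by_cases h : inb ci cj = true ∧ vget visited ci cj = 0
  · exact Prod.Lex.left _ _ (ucount_vset_lt visited ci cj h.1 h.2)
  · rw [ucount_vset_eq visited ci cj h]
    exact Prod.Lex.right _ (wsum_decreases lst visited ci cj rest h)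

def bfs (si : Int) (sj : Int) (gi : Int) (gj : Int) (lst : List (List String)) : Int :=
  bfsLoop gi gj lst [(si, sj)] initV

-- ===== PORT B =====
def dirsB : List (Int × Int) := [(-1, 0), (1, 0), (0, -1), (0, 1)]

-- port of B's recursive `dfs`; `fuel` is a totality guard only (one unit per cell visit;
-- 257 > 256 cells, never exhausted on the inputs admitted by Pre_bfs — proved below)
mutual
def dfsCell (gi gj : Int) (lst : List (List String)) (fuel : Nat) (i j : Int)
    (v : List (List Int)) : Bool × List (List Int) :=
  match fuel with
  | 0 => (false, v)
  | Nat.succ f =>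
    if i = gi ∧ j = gj then (true, vset v i j)
    else dfsDirs gi gj lst f i j dirsB (vset v i j)
termination_by (fuel, 0)

def dfsDirs (gi gj : Int) (lst : List (List String)) (f : Nat) (i j : Int)
    (ds : List (Int × Int)) (v : List (List Int)) : Bool × List (List Int) :=
  match ds with
  | [] => (false, v)
  | (a, b) :: ds' =>
    if inb (i + a) (j + b) ∧ vget v (i + a) (j + b) = 0 ∧ cellD lst (i + a) (j + b) ≠ "1" then
      match dfsCell gi gj lst f (i + a) (j + b) v with
      | (true, v') => (true, v')
      | (false, v') => dfsDirs gi gj lst f i j ds' v'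
    else dfsDirs gi gj lst f i j ds' v
termination_by (f, ds.length + 1)
end

def bfs_alt (si : Int) (sj : Int) (gi : Int) (gj : Int) (lst : List (List String)) : Int :=
  if si = gi ∧ sj = gj then 1
  else if (dfsCell gi gj lst 257 si sj initV).1 then 1 else 0

-- ===== PRECONDITION & SPEC =====
-- Pre_bfs = the inputs on which the Python A returns normally and by its intended reading:
-- either start = goal (A returns 1 immediately, touching nothing); or the start's square is in
-- [-16,16)² and every in-board neighbour of the start that exists is a wall "1" (A pops the
-- start once, pushes nothing and returns 0 without stepping anywhere); or the start lies on the
-- 16×16 board and the first 16 rows of lst have at least 16 entries each.  Excluded (A can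
-- still return there): off-board or partial-board starts whose search actually walks into the
-- board, where A's negative-index wraparound marks mirrored `visited` cells (an accident of
-- Python indexing) and a grid cell missing inside the walked area raises IndexError.
def Pre_bfs (si : Int) (sj : Int) (gi : Int) (gj : Int) (lst : List (List String)) : Prop :=
  (si = gi ∧ sj = gj) ∨
  (-16 ≤ si ∧ si < 16 ∧ -16 ≤ sj ∧ sj < 16 ∧
    ∀ d ∈ dirsB, inb (si + d.1) (sj + d.2) = true →
      (lst.getD (si + d.1).toNat []).getD (sj + d.2).toNat "" = "1") ∨
  (inb si sj = true ∧ 16 ≤ lst.length ∧ ∀ row ∈ lst.take 16, 16 ≤ row.length)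
instance (si : Int) (sj : Int) (gi : Int) (gj : Int) (lst : List (List String)) : Decidable (Pre_bfs si sj gi gj lst) := by unfold Pre_bfs; infer_instance

def pvWitness_bfs : Int × Int × Int × Int × List (List String) :=
  (0, 0, 1, 1, List.replicate 16 (List.replicate 16 "0"))

def Spec_bfs (si : Int) (sj : Int) (gi : Int) (gj : Int) (lst : List (List String)) (out : Int) : Prop := out = bfs_alt si sj gi gj lst
instance (si : Int) (sj : Int) (gi : Int) (gj : Int) (lst : List (List String)) (out : Int) : Decidable (Spec_bfs si sj gi gj lst out) := by unfold Spec_bfs; infer_instance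

-- ===== CLAIM (what is proved, stated in full; the proofs are below) =====
def Claim_equal_bfs : Prop := ∀ (si : Int) (sj : Int) (gi : Int) (gj : Int) (lst : List (List String)), Dom_bfs si sj gi gj lst → Pre_bfs si sj gi gj lst → Spec_bfs si sj gi gj lst (bfs si sj gi gj lst)

-- ===== LEMMAS AND PROOFS =====

theorem pv_count0_set_le : ∀ (l : List Int) (m : Nat), (l.set m 1).count 0 ≤ l.count 0 := by
  intro l
  induction l with
  | nil => intro m; simp
  | cons x xs ih =>
    intro m
    cases m with
    | zero =>
      simp only [List.set_cons_zero, List.count_cons]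
      by_cases hx : x = 0 <;> simp [hx]
    | succ k => simp only [List.set_cons_succ, List.count_cons]; have := ih k; omega

theorem ucount_vset_le (v : List (List Int)) (i j : Int) : ucount (vset v i j) ≤ ucount v := by
  unfold vset
  split
  · by_cases hn : i.toNat < v.length
    · have h := pv_sum_map_set (fun r => r.count 0) v i.toNat ((v.getD i.toNat []).set j.toNat 1) hn
      have h2 := pv_count0_set_le (v.getD i.toNat []) j.toNat
      unfold ucount
      beta_reduce at h
      omega
    · rw [pv_set_oob v i.toNat _ (by omega)]
  · exact le_refl _


-- cells that are on the board and not walls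
def eligP (lst : List (List String)) (i j : Int) : Prop :=
  inb i j = true ∧ cellD lst i j ≠ "1"

-- the common reachability relation both searches compute: cells connected to the start
-- through eligible (on-board, non-wall) steps
inductive ReachP (lst : List (List String)) (si sj : Int) : Int → Int → Prop where
  | start : ReachP lst si sj si sj
  | step {u1 u2 : Int} {d : Int × Int} : ReachP lst si sj u1 u2 → d ∈ dirsB →
      eligP lst (u1 + d.1) (u2 + d.2) → ReachP lst si sj (u1 + d.1) (u2 + d.2)

-- "reachable from the current queue through still-unvisited eligible cells"
inductive RQ (lst : List (List String)) (que : List (Int × Int)) (v : List (List Int)) :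
    Int → Int → Prop where
  | base {i j : Int} : (i, j) ∈ que → RQ lst que v i j
  | step {u1 u2 : Int} {d : Int × Int} : RQ lst que v u1 u2 → d ∈ dirsB →
      eligP lst (u1 + d.1) (u2 + d.2) → vget v (u1 + d.1) (u2 + d.2) = 0 →
      RQ lst que v (u1 + d.1) (u2 + d.2)

theorem inb_nonneg {i j : Int} (h : inb i j = true) : 0 ≤ i ∧ 0 ≤ j := by
  have := of_decide_eq_true h
  exact ⟨this.1, this.2.2.1⟩

theorem vget_init (i j : Int) (hb : inb i j = true) : vget initV i j = 0 := by
  have hb' : 0 ≤ i ∧ i < 16 ∧ 0 ≤ j ∧ j < 16 := by simpa [inb] using hb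
  unfold vget initV
  rw [if_pos ⟨hb'.1, hb'.2.2.1⟩, List.getD_replicate _ (by omega), List.getD_replicate _ (by omega)]

theorem vget_vset_mono (v : List (List Int)) (i j a b : Int)
    (ha : 0 ≤ a) (hb2 : 0 ≤ b) (h : vget v a b = 1) : vget (vset v i j) a b = 1 := by
  by_cases heq : a = i ∧ b = j
  · by_cases hbij : inb i j = true
    · rw [heq.1, heq.2]; exact vget_vset_self v i j hbij
    · unfold vset; rw [if_neg hbij]; exact h
  · rw [vget_vset_ne v i j a b ha hb2 heq]; exact h

def WFg (v : List (List Int)) : Prop := ∀ a b : Int, vget v a b = 0 ∨ vget v a b = 1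

theorem wfg_vset {v : List (List Int)} (hwf : WFg v) (i j : Int) : WFg (vset v i j) := by
  intro a b
  by_cases hab : 0 ≤ a ∧ 0 ≤ b
  · by_cases heq : a = i ∧ b = j
    · by_cases hbij : inb i j = true
      · right; rw [heq.1, heq.2]; exact vget_vset_self v i j hbij
      · unfold vset; rw [if_neg hbij]; exact hwf a b
    · rw [vget_vset_ne v i j a b hab.1 hab.2 heq]; exact hwf a b
  · right; unfold vget; rw [if_neg hab]

theorem wfg_initV : WFg initV := by
  intro a b
  by_cases hab : 0 ≤ a ∧ 0 ≤ b
  · by_cases hr : a < 16 ∧ b < 16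
    · left; exact vget_init a b (by simp [inb]; omega)
    · right
      rcases not_and_or.1 hr with h | h
      · have hrow : (initV.getD a.toNat ([] : List Int)) = [] := by
          unfold initV
          rw [List.getD_eq_getElem?_getD (l := List.replicate 16 (List.replicate 16 (0:Int))),
            List.getElem?_eq_none (by simp; omega)]
          rfl
        unfold vget
        rw [if_pos hab, hrow]
        rfl
      · unfold vget
        rw [if_pos hab]
        by_cases ha16 : a < 16
        · unfold initV
          rw [List.getD_replicate _ (by omega),
            List.getD_eq_getElem?_getD (l := List.replicate 16 (0:Int)),
            List.getElem?_eq_none (by simp; omega)]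
          rfl
        · have hrow : (initV.getD a.toNat ([] : List Int)) = [] := by
            unfold initV
            rw [List.getD_eq_getElem?_getD (l := List.replicate 16 (List.replicate 16 (0:Int))),
              List.getElem?_eq_none (by simp; omega)]
            rfl
          rw [hrow]
          rfl
  · right; unfold vget; rw [if_neg hab]

theorem mem_pushes {lst : List (List String)} {v2 : List (List Int)} {ci cj : Int}
    {w : Int × Int} :
    w ∈ pushes lst v2 ci cj ↔
      ∃ d ∈ dirsB, w = (ci + d.1, cj + d.2) ∧ inb w.1 w.2 = true ∧ vget v2 w.1 w.2 = 0 ∧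
        cellD lst w.1 w.2 ≠ "1" := by
  constructor
  · intro hw
    unfold pushes at hw
    rw [List.mem_filterMap] at hw
    obtain ⟨k, hk, he⟩ := hw
    have hk4 : k < 4 := by simpa using hk
    split at he
    · rename_i hcond
      injection he with he2
      subst he2
      interval_cases k
      · exact ⟨(-1, 0), by simp [dirsB], rfl, hcond.1, hcond.2.1, hcond.2.2⟩
      · exact ⟨(1, 0), by simp [dirsB], rfl, hcond.1, hcond.2.1, hcond.2.2⟩
      · exact ⟨(0, -1), by simp [dirsB], rfl, hcond.1, hcond.2.1, hcond.2.2⟩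
      · exact ⟨(0, 1), by simp [dirsB], rfl, hcond.1, hcond.2.1, hcond.2.2⟩
    · simp at he
  · rintro ⟨d, hd, rfl, hb, hv, hc⟩
    unfold pushes
    rw [List.mem_filterMap]
    simp only [dirsB, List.mem_cons, List.not_mem_nil, or_false] at hd
    rcases hd with rfl | rfl | rfl | rfl
    · refine ⟨0, by simp, ?_⟩
      rw [if_pos ⟨hb, hv, hc⟩]
      rfl
    · refine ⟨1, by simp, ?_⟩
      rw [if_pos ⟨hb, hv, hc⟩]
      rfl
    · refine ⟨2, by simp, ?_⟩
      rw [if_pos ⟨hb, hv, hc⟩]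
      rfl
    · refine ⟨3, by simp, ?_⟩
      rw [if_pos ⟨hb, hv, hc⟩]
      rfl

theorem reach_elig {lst : List (List String)} {si sj i j : Int}
    (h : ReachP lst si sj i j) : (i = si ∧ j = sj) ∨ eligP lst i j := by
  cases h with
  | start => exact Or.inl ⟨rfl, rfl⟩
  | step _ _ he => exact Or.inr he

-- ===== A-side: the BFS loop returns 1 exactly on reachable goals =====

theorem bfsLoop_values (gi gj : Int) (lst : List (List String))
    (que : List (Int × Int)) (v : List (List Int)) :
    bfsLoop gi gj lst que v = 0 ∨ bfsLoop gi gj lst que v = 1 := by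
  fun_induction bfsLoop gi gj lst que v with
  | case1 => exact Or.inl rfl
  | case2 => exact Or.inr rfl
  | case3 _ _ _ _ _ ih => exact ih

theorem bfsLoop_sound (gi gj si sj : Int) (lst : List (List String))
    (que : List (Int × Int)) (v : List (List Int)) :
    (∀ e ∈ que, ReachP lst si sj e.1 e.2) →
    bfsLoop gi gj lst que v = 1 → ReachP lst si sj gi gj := by
  fun_induction bfsLoop gi gj lst que v with
  | case1 => intro _ h; exact absurd h (by norm_num)
  | case2 v ci cj rest hgoal =>
    intro hq _
    have := hq (ci, cj) List.mem_cons_self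
    rw [hgoal.1, hgoal.2] at this
    exact this
  | case3 v ci cj rest hgoal ih =>
    intro hq h1
    apply ih ?_ h1
    intro e he
    rcases List.mem_append.1 he with hr | hp
    · exact hq e (List.mem_cons_of_mem _ hr)
    · rw [mem_pushes] at hp
      obtain ⟨d, hd, rfl, hb, _, hc⟩ := hp
      exact ReachP.step (hq (ci, cj) List.mem_cons_self) hd ⟨hb, hc⟩

theorem rq_empty {lst : List (List String)} {v : List (List Int)} {i j : Int}
    (h : RQ lst [] v i j) : False := by
  induction h with
  | base hm => simp at hm
  | step _ _ _ _ ih => exact ih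

theorem rq_transfer {lst : List (List String)} {v : List (List Int)} {ci cj w1 w2 : Int}
    {rest : List (Int × Int)} (hc : inb ci cj = true)
    (h : RQ lst ((ci, cj) :: rest) v w1 w2) :
    (w1 = ci ∧ w2 = cj) ∨
      RQ lst (rest ++ pushes lst (vset v ci cj) ci cj) (vset v ci cj) w1 w2 := by
  induction h with
  | base hm =>
    rcases List.mem_cons.1 hm with he | hr
    · left; exact ⟨congrArg Prod.fst he, congrArg Prod.snd he⟩
    · right; exact RQ.base (List.mem_append_left _ hr)
  | @step u1 u2 d hu hd he hv0 ih =>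
    by_cases hw : u1 + d.1 = ci ∧ u2 + d.2 = cj
    · exact Or.inl hw
    · right
      have hnn := inb_nonneg he.1
      have hvw' : vget (vset v ci cj) (u1 + d.1) (u2 + d.2) = 0 := by
        rw [vget_vset_ne v ci cj _ _ hnn.1 hnn.2 hw]; exact hv0
      rcases ih with ⟨rfl, rfl⟩ | hrq
      · apply RQ.base
        apply List.mem_append_right
        rw [mem_pushes]
        exact ⟨d, hd, rfl, he.1, hvw', he.2⟩
      · exact RQ.step hrq hd he hvw'

theorem bfsLoop_complete (gi gj si sj : Int) (lst : List (List String))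
    (que : List (Int × Int)) (v : List (List Int)) :
    (∀ e ∈ que, inb e.1 e.2 = true) →
    (∀ w1 w2, eligP lst w1 w2 → ReachP lst si sj w1 w2 → vget v w1 w2 = 0 →
      RQ lst que v w1 w2) →
    vget v gi gj = 0 → eligP lst gi gj → ReachP lst si sj gi gj →
    bfsLoop gi gj lst que v = 1 := by
  fun_induction bfsLoop gi gj lst que v with
  | case1 v =>
    intro _ hK hg he hr
    exact absurd (hK gi gj he hr hg) rq_empty
  | case2 => intro _ _ _ _ _; rfl
  | case3 v ci cj rest hgoal ih =>
    intro hq hK hg he hr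
    have hcinb : inb ci cj = true := hq (ci, cj) List.mem_cons_self
    apply ih
    · intro e hee
      rcases List.mem_append.1 hee with h1 | h2
      · exact hq e (List.mem_cons_of_mem _ h1)
      · rw [mem_pushes] at h2
        obtain ⟨d, _, rfl, hb, _, _⟩ := h2
        exact hb
    · intro w1 w2 hew hrw hv0'
      have hnn := inb_nonneg hew.1
      have hwc : ¬(w1 = ci ∧ w2 = cj) := by
        rintro ⟨rfl, rfl⟩
        rw [vget_vset_self v w1 w2 hcinb] at hv0'
        exact one_ne_zero hv0'
      have hv0 : vget v w1 w2 = 0 := by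
        rw [vget_vset_ne v ci cj w1 w2 hnn.1 hnn.2 hwc] at hv0'
        exact hv0'
      rcases rq_transfer hcinb (hK w1 w2 hew hrw hv0) with hcontra | hnew
      · exact absurd hcontra hwc
      · exact hnew
    · have hgn := inb_nonneg he.1
      rw [vget_vset_ne v ci cj gi gj hgn.1 hgn.2 (by rintro ⟨rfl, rfl⟩; exact hgoal ⟨rfl, rfl⟩)]
      exact hg
    · exact he
    · exact hr

theorem bfsA_iff (si sj gi gj : Int) (lst : List (List String))
    (hs : inb si sj = true) (hne : ¬(si = gi ∧ sj = gj)) :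
    bfs si sj gi gj lst = 1 ↔ ReachP lst si sj gi gj := by
  constructor
  · intro h
    refine bfsLoop_sound gi gj si sj lst [(si, sj)] initV ?_ h
    intro e he
    simp only [List.mem_singleton] at he
    subst he
    exact ReachP.start
  · intro hr
    have helig : eligP lst gi gj := by
      rcases reach_elig hr with ⟨h1, h2⟩ | h
      · exact absurd ⟨h1.symm, h2.symm⟩ hne
      · exact h
    refine bfsLoop_complete gi gj si sj lst [(si, sj)] initV ?_ ?_ ?_ helig hr
    · intro e he
      simp only [List.mem_singleton] at he
      subst he
      exact hs
    · intro w1 w2 hew hrw hv0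
      clear hr hew hv0
      induction hrw with
      | start => exact RQ.base (by simp)
      | step hu hd he2 ih => exact RQ.step ih hd he2 (vget_init _ _ he2.1)
    · exact vget_init gi gj helig.1

-- ===== B-side: the DFS returns true exactly on reachable goals =====

theorem ucount_pos_of_vget0 (v : List (List Int)) (a b : Int) (h : vget v a b = 0) :
    0 < ucount v := by
  unfold vget at h
  by_cases hab : 0 ≤ a ∧ 0 ≤ b
  · rw [if_pos hab] at h
    have hn : a.toNat < v.length := by
      by_contra hc
      have hrow : v.getD a.toNat ([] : List Int) = [] := by
        rw [List.getD_eq_getElem?_getD (l := v), List.getElem?_eq_none (by omega)]; rfl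
      rw [hrow] at h
      simp [List.getD] at h
    have hrow : v.getD a.toNat ([] : List Int) = v[a.toNat] := by
      rw [List.getD_eq_getElem?_getD (l := v), List.getElem?_eq_getElem hn]; rfl
    rw [hrow] at h
    have hm : b.toNat < (v[a.toNat]).length := by
      by_contra hc
      rw [List.getD_eq_getElem?_getD, List.getElem?_eq_none (by omega)] at h
      simp at h
    have hmem : (0 : Int) ∈ v[a.toNat] := by
      rw [List.getD_eq_getElem?_getD, List.getElem?_eq_getElem hm] at h
      simp only [Option.getD_some] at h
      rw [← h]
      exact List.getElem_mem _
    have hcnt : 1 ≤ (v[a.toNat]).count 0 := List.one_le_count_iff.2 hmem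
    have hmem2 : (v[a.toNat]).count 0 ∈ v.map (fun r => r.count 0) :=
      List.mem_map.2 ⟨v[a.toNat], List.getElem_mem _, rfl⟩
    have := List.single_le_sum (fun (x : Nat) _ => Nat.zero_le x) _ hmem2
    unfold ucount
    omega
  · rw [if_neg hab] at h
    exact absurd h (by norm_num)

theorem dfs_basic (gi gj : Int) (lst : List (List String)) : ∀ f : Nat,
    (∀ i j v,
        (∀ a b, 0 ≤ a → 0 ≤ b → vget v a b = 1 → vget (dfsCell gi gj lst f i j v).2 a b = 1)
      ∧ ucount (dfsCell gi gj lst f i j v).2 ≤ ucount v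
      ∧ ((dfsCell gi gj lst f i j v).1 = false → 0 ≤ gi → 0 ≤ gj →
            vget (dfsCell gi gj lst f i j v).2 gi gj = vget v gi gj)
      ∧ (1 ≤ f → inb i j = true → vget (dfsCell gi gj lst f i j v).2 i j = 1)
      ∧ (WFg v → WFg (dfsCell gi gj lst f i j v).2))
  ∧ (∀ ds i j v,
        (∀ a b, 0 ≤ a → 0 ≤ b → vget v a b = 1 → vget (dfsDirs gi gj lst f i j ds v).2 a b = 1)
      ∧ ucount (dfsDirs gi gj lst f i j ds v).2 ≤ ucount v
      ∧ ((dfsDirs gi gj lst f i j ds v).1 = false → 0 ≤ gi → 0 ≤ gj →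
            vget (dfsDirs gi gj lst f i j ds v).2 gi gj = vget v gi gj)
      ∧ (WFg v → WFg (dfsDirs gi gj lst f i j ds v).2)) := by
  intro f
  induction f with
  | zero =>
    have hc0 : ∀ i j v, dfsCell gi gj lst 0 i j v = (false, v) := by
      intro i j v; rw [dfsCell]
    constructor
    · intro i j v
      rw [hc0]
      exact ⟨fun a b _ _ h => h, le_refl _, fun _ _ _ => rfl,
        fun h1 _ => absurd h1 (by omega), fun h => h⟩
    · intro ds
      induction ds with
      | nil =>
        intro i j v
        have h0 : dfsDirs gi gj lst 0 i j [] v = (false, v) := by rw [dfsDirs]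
        rw [h0]
        exact ⟨fun a b _ _ h => h, le_refl _, fun _ _ _ => rfl, fun h => h⟩
      | cons hd tl ihds =>
        obtain ⟨p, q⟩ := hd
        intro i j v
        rw [dfsDirs]
        split
        · rw [hc0]
          exact ihds i j v
        · exact ihds i j v
  | succ f ihf =>
    have hcell : ∀ i j v,
        (∀ a b, 0 ≤ a → 0 ≤ b → vget v a b = 1 →
          vget (dfsCell gi gj lst (f + 1) i j v).2 a b = 1)
      ∧ ucount (dfsCell gi gj lst (f + 1) i j v).2 ≤ ucount v
      ∧ ((dfsCell gi gj lst (f + 1) i j v).1 = false → 0 ≤ gi → 0 ≤ gj →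
            vget (dfsCell gi gj lst (f + 1) i j v).2 gi gj = vget v gi gj)
      ∧ (1 ≤ f + 1 → inb i j = true → vget (dfsCell gi gj lst (f + 1) i j v).2 i j = 1)
      ∧ (WFg v → WFg (dfsCell gi gj lst (f + 1) i j v).2) := by
      intro i j v
      rw [dfsCell]
      split
      · exact ⟨fun a b ha hb h => vget_vset_mono v i j a b ha hb h, ucount_vset_le v i j,
          fun h _ _ => by simp at h, fun _ hb => vget_vset_self v i j hb,
          fun hw => wfg_vset hw i j⟩
      · rename_i hng
        obtain ⟨m, u, g, w⟩ := ihf.2 dirsB i j (vset v i j)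
        refine ⟨fun a b ha hb h => m a b ha hb (vget_vset_mono v i j a b ha hb h),
          le_trans u (ucount_vset_le v i j), ?_,
          fun _ hb => m i j (inb_nonneg hb).1 (inb_nonneg hb).2 (vget_vset_self v i j hb),
          fun hw => w (wfg_vset hw i j)⟩
        intro h hgi hgj
        rw [g h hgi hgj]
        exact vget_vset_ne v i j gi gj hgi hgj (fun hc => hng ⟨hc.1.symm, hc.2.symm⟩)
    refine ⟨hcell, ?_⟩
    intro ds
    induction ds with
    | nil =>
      intro i j v
      have h0 : dfsDirs gi gj lst (f + 1) i j [] v = (false, v) := by rw [dfsDirs]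
      rw [h0]
      exact ⟨fun a b _ _ h => h, le_refl _, fun _ _ _ => rfl, fun h => h⟩
    | cons hd tl ihds =>
      obtain ⟨p, q⟩ := hd
      intro i j v
      rw [dfsDirs]
      split
      · rcases hres : dfsCell gi gj lst (f + 1) (i + p) (j + q) v with ⟨bres, v'⟩
        obtain ⟨mC, uC, gC, sC, wC⟩ := hcell (i + p) (j + q) v
        rw [hres] at mC uC gC sC wC
        cases bres
        · obtain ⟨mD, uD, gD, wD⟩ := ihds i j v'
          exact ⟨fun a b ha hb h => mD a b ha hb (mC a b ha hb h),
            le_trans uD uC,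
            fun h hgi hgj => by rw [gD h hgi hgj]; exact gC rfl hgi hgj,
            fun hw => wD (wC hw)⟩
        · exact ⟨mC, uC, fun h _ _ => by simp at h, wC⟩
      · exact ihds i j v

theorem dfs_sound (gi gj : Int) (lst : List (List String)) (R : Int → Int → Prop)
    (hclo : ∀ u1 u2 (d : Int × Int), R u1 u2 → d ∈ dirsB →
      eligP lst (u1 + d.1) (u2 + d.2) → R (u1 + d.1) (u2 + d.2)) : ∀ f : Nat,
    (∀ i j v, R i j → (dfsCell gi gj lst f i j v).1 = true → R gi gj)
  ∧ (∀ ds, ds ⊆ dirsB → ∀ i j v, R i j → (dfsDirs gi gj lst f i j ds v).1 = true → R gi gj) := by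
  intro f
  induction f with
  | zero =>
    have hc0 : ∀ i j v, dfsCell gi gj lst 0 i j v = (false, v) := by
      intro i j v; rw [dfsCell]
    constructor
    · intro i j v _ htrue
      rw [hc0] at htrue
      simp at htrue
    · intro ds
      induction ds with
      | nil =>
        intro _ i j v _ htrue
        rw [show dfsDirs gi gj lst 0 i j [] v = (false, v) from by rw [dfsDirs]] at htrue
        simp at htrue
      | cons hd tl ihds =>
        obtain ⟨p, q⟩ := hd
        intro hsub i j v hR htrue
        have hsub' : tl ⊆ dirsB := fun x hx => hsub (List.mem_cons_of_mem _ hx)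
        rw [dfsDirs] at htrue
        split at htrue
        · rw [hc0] at htrue
          exact ihds hsub' i j v hR htrue
        · exact ihds hsub' i j v hR htrue
  | succ f ihf =>
    have hcell : ∀ i j v, R i j → (dfsCell gi gj lst (f + 1) i j v).1 = true → R gi gj := by
      intro i j v hR htrue
      rw [dfsCell] at htrue
      split at htrue
      · rename_i hg
        rcases hg with ⟨rfl, rfl⟩
        exact hR
      · exact ihf.2 dirsB (fun x h => h) i j (vset v i j) hR htrue
    refine ⟨hcell, ?_⟩
    intro ds
    induction ds with
    | nil =>
      intro _ i j v _ htrue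
      rw [show dfsDirs gi gj lst (f + 1) i j [] v = (false, v) from by rw [dfsDirs]] at htrue
      simp at htrue
    | cons hd tl ihds =>
      obtain ⟨p, q⟩ := hd
      intro hsub i j v hR htrue
      have hsub' : tl ⊆ dirsB := fun x hx => hsub (List.mem_cons_of_mem _ hx)
      rw [dfsDirs] at htrue
      split at htrue
      · rename_i hguard
        rcases hres : dfsCell gi gj lst (f + 1) (i + p) (j + q) v with ⟨bres, v'⟩
        rw [hres] at htrue
        have hRn : R (i + p) (j + q) :=
          hclo i j (p, q) hR (hsub List.mem_cons_self) ⟨hguard.1, hguard.2.2⟩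
        cases bres
        · exact ihds hsub' i j v' hR htrue
        · exact hcell (i + p) (j + q) v hRn (by rw [hres])
      · exact ihds hsub' i j v hR htrue

theorem dfs_closure (gi gj : Int) (lst : List (List String)) : ∀ f : Nat,
    (∀ i j v, WFg v → inb i j = true → ucount (vset v i j) < f →
       (dfsCell gi gj lst f i j v).1 = false →
       (∀ a b, 0 ≤ a → 0 ≤ b → vget (dfsCell gi gj lst f i j v).2 a b = 1 →
          vget v a b = 1 ∨ ∀ d ∈ dirsB, eligP lst (a + d.1) (b + d.2) →
            vget (dfsCell gi gj lst f i j v).2 (a + d.1) (b + d.2) = 1))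
  ∧ (∀ ds, ds ⊆ dirsB → ∀ i j v, WFg v → ucount v ≤ f →
       (dfsDirs gi gj lst f i j ds v).1 = false →
       ((∀ a b, 0 ≤ a → 0 ≤ b → vget (dfsDirs gi gj lst f i j ds v).2 a b = 1 →
           vget v a b = 1 ∨ ∀ d ∈ dirsB, eligP lst (a + d.1) (b + d.2) →
             vget (dfsDirs gi gj lst f i j ds v).2 (a + d.1) (b + d.2) = 1)
        ∧ (∀ d ∈ ds, eligP lst (i + d.1) (j + d.2) →
             vget (dfsDirs gi gj lst f i j ds v).2 (i + d.1) (j + d.2) = 1))) := by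
  intro f
  induction f with
  | zero =>
    constructor
    · intro i j v _ _ hfuel
      exact absurd hfuel (Nat.not_lt_zero _)
    · intro ds
      induction ds with
      | nil =>
        intro _ i j v _ _ _
        have h0 : dfsDirs gi gj lst 0 i j [] v = (false, v) := by rw [dfsDirs]
        rw [h0]
        exact ⟨fun a b _ _ h => Or.inl h, fun d hd => nomatch hd⟩
      | cons hd tl ihds =>
        obtain ⟨p, q⟩ := hd
        intro hsub i j v hwf hfuel hfalse
        have hsub' : tl ⊆ dirsB := fun x hx => hsub (List.mem_cons_of_mem _ hx)
        rw [dfsDirs] at hfalse ⊢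
        by_cases hguard : inb (i + p) (j + q) = true ∧ vget v (i + p) (j + q) = 0 ∧
            cellD lst (i + p) (j + q) ≠ "1"
        · exact absurd hfuel (by
            have := ucount_pos_of_vget0 v (i + p) (j + q) hguard.2.1
            omega)
        · rw [if_neg hguard] at hfalse ⊢
          obtain ⟨CA, CB⟩ := ihds hsub' i j v hwf hfuel hfalse
          refine ⟨CA, ?_⟩
          intro d hd2 he
          rcases List.mem_cons.1 hd2 with heq | htl
          · subst heq
            have hv1 : vget v (i + p) (j + q) = 1 := by
              rcases hwf (i + p) (j + q) with h0 | h1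
              · exact absurd ⟨he.1, h0, he.2⟩ hguard
              · exact h1
            exact ((dfs_basic gi gj lst 0).2 tl i j v).1 _ _ (inb_nonneg he.1).1
              (inb_nonneg he.1).2 hv1
          · exact CB d htl he
  | succ f ihf =>
    have hcellC : ∀ i j v, WFg v → inb i j = true → ucount (vset v i j) < f + 1 →
        (dfsCell gi gj lst (f + 1) i j v).1 = false →
        (∀ a b, 0 ≤ a → 0 ≤ b → vget (dfsCell gi gj lst (f + 1) i j v).2 a b = 1 →
          vget v a b = 1 ∨ ∀ d ∈ dirsB, eligP lst (a + d.1) (b + d.2) →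
            vget (dfsCell gi gj lst (f + 1) i j v).2 (a + d.1) (b + d.2) = 1) := by
      intro i j v hwf hinb hfuel hfalse
      rw [dfsCell] at hfalse ⊢
      split at hfalse
      · simp at hfalse
      · rename_i hng
        rw [if_neg hng]
        obtain ⟨CA', CB'⟩ := ihf.2 dirsB (fun x h => h) i j (vset v i j)
          (wfg_vset hwf i j) (by omega) hfalse
        intro a b ha hb hmark
        by_cases hab : a = i ∧ b = j
        · right
          intro d hd2 he
          rw [hab.1, hab.2]
          exact CB' d hd2 (by rw [← hab.1, ← hab.2]; exact he)
        · rcases CA' a b ha hb hmark with h1 | h2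
          · rw [vget_vset_ne v i j a b ha hb hab] at h1
            exact Or.inl h1
          · exact Or.inr h2
    refine ⟨hcellC, ?_⟩
    intro ds
    induction ds with
    | nil =>
      intro _ i j v _ _ _
      have h0 : dfsDirs gi gj lst (f + 1) i j [] v = (false, v) := by rw [dfsDirs]
      rw [h0]
      exact ⟨fun a b _ _ h => Or.inl h, fun d hd => nomatch hd⟩
    | cons hd tl ihds =>
      obtain ⟨p, q⟩ := hd
      intro hsub i j v hwf hfuel hfalse
      have hsub' : tl ⊆ dirsB := fun x hx => hsub (List.mem_cons_of_mem _ hx)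
      rw [dfsDirs] at hfalse ⊢
      by_cases hguard : inb (i + p) (j + q) = true ∧ vget v (i + p) (j + q) = 0 ∧
          cellD lst (i + p) (j + q) ≠ "1"
      · rw [if_pos hguard] at hfalse ⊢
        rcases hres : dfsCell gi gj lst (f + 1) (i + p) (j + q) v with ⟨bres, v'⟩
        rw [hres] at hfalse
        cases bres
        · have hfuelsub : ucount (vset v (i + p) (j + q)) < f + 1 :=
            lt_of_lt_of_le (ucount_vset_lt v _ _ hguard.1 hguard.2.1) hfuel
          have hCsub := hcellC (i + p) (j + q) v hwf hguard.1 hfuelsub (by rw [hres])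
          rw [hres] at hCsub
          obtain ⟨mC, uC, gC, sC, wC⟩ := (dfs_basic gi gj lst (f + 1)).1 (i + p) (j + q) v
          rw [hres] at mC uC sC wC
          have hwf' : WFg v' := wC hwf
          have hfuel' : ucount v' ≤ f + 1 := le_trans uC hfuel
          obtain ⟨CA2, CB2⟩ := ihds hsub' i j v' hwf' hfuel' hfalse
          have hmono := ((dfs_basic gi gj lst (f + 1)).2 tl i j v').1
          constructor
          · intro a b ha hb hmark
            rcases CA2 a b ha hb hmark with h1 | h2
            · rcases hCsub a b ha hb h1 with h3 | h4
              · exact Or.inl h3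
              · right
                intro d hd2 he
                exact hmono _ _ (inb_nonneg he.1).1 (inb_nonneg he.1).2 (h4 d hd2 he)
            · exact Or.inr h2
          · intro d hd2 he
            rcases List.mem_cons.1 hd2 with heq | htl
            · subst heq
              have hm : vget v' (i + p) (j + q) = 1 := sC (by omega) hguard.1
              exact hmono _ _ (inb_nonneg he.1).1 (inb_nonneg he.1).2 hm
            · exact CB2 d htl he
        · simp at hfalse
      · rw [if_neg hguard] at hfalse ⊢
        obtain ⟨CA2, CB2⟩ := ihds hsub' i j v hwf hfuel hfalse
        refine ⟨CA2, ?_⟩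
        intro d hd2 he
        rcases List.mem_cons.1 hd2 with heq | htl
        · subst heq
          have hv1 : vget v (i + p) (j + q) = 1 := by
            rcases hwf (i + p) (j + q) with h0 | h1
            · exact absurd ⟨he.1, h0, he.2⟩ hguard
            · exact h1
          exact ((dfs_basic gi gj lst (f + 1)).2 tl i j v).1 _ _ (inb_nonneg he.1).1
            (inb_nonneg he.1).2 hv1
        · exact CB2 d htl he

theorem ucount_initV : ucount initV = 256 := by decide

theorem bfsB_iff (si sj gi gj : Int) (lst : List (List String))
    (hs : inb si sj = true) (hne : ¬(si = gi ∧ sj = gj)) :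
    bfs_alt si sj gi gj lst = 1 ↔ ReachP lst si sj gi gj := by
  unfold bfs_alt
  rw [if_neg hne]
  constructor
  · intro h
    have hfst : (dfsCell gi gj lst 257 si sj initV).1 = true := by
      by_contra hf
      rw [if_neg hf] at h
      exact absurd h (by norm_num)
    exact (dfs_sound gi gj lst (ReachP lst si sj)
      (fun u1 u2 d hu hd he => ReachP.step hu hd he) 257).1 si sj initV ReachP.start hfst
  · intro hr
    have helig : eligP lst gi gj := by
      rcases reach_elig hr with ⟨h1, h2⟩ | h
      · exact absurd ⟨h1.symm, h2.symm⟩ hne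
      · exact h
    have hgn := inb_nonneg helig.1
    suffices h : (dfsCell gi gj lst 257 si sj initV).1 = true by rw [if_pos h]
    by_contra hf
    have hfalse : (dfsCell gi gj lst 257 si sj initV).1 = false := by
      cases hx : (dfsCell gi gj lst 257 si sj initV).1
      · rfl
      · exact absurd hx hf
    have hfuel : ucount (vset initV si sj) < 257 := by
      have := ucount_vset_le initV si sj
      rw [ucount_initV] at this
      omega
    have hclosure := (dfs_closure gi gj lst 257).1 si sj initV wfg_initV hs hfuel hfalse
    have hbasic := (dfs_basic gi gj lst 257).1 si sj initV
    have hmarkstart : vget (dfsCell gi gj lst 257 si sj initV).2 si sj = 1 :=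
      hbasic.2.2.2.1 (by omega) hs
    have hgoal0 : vget (dfsCell gi gj lst 257 si sj initV).2 gi gj = 0 := by
      rw [hbasic.2.2.1 hfalse hgn.1 hgn.2]
      exact vget_init gi gj helig.1
    have hall : ∀ w1 w2, ReachP lst si sj w1 w2 → vget (dfsCell gi gj lst 257 si sj initV).2 w1 w2 = 1 := by
      intro w1 w2 hw
      induction hw with
      | start => exact hmarkstart
      | @step u1 u2 d hu hd he ih =>
        have hinbu : inb u1 u2 = true := by
          rcases reach_elig hu with ⟨rfl, rfl⟩ | hel
          · exact hs
          · exact hel.1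
        have hnn := inb_nonneg hinbu
        rcases hclosure u1 u2 hnn.1 hnn.2 ih with h1 | h2
        · rw [vget_init u1 u2 hinbu] at h1
          exact absurd h1 (by norm_num)
        · exact h2 d hd he
    rw [hall gi gj hr] at hgoal0
    exact absurd hgoal0 (by norm_num)

theorem getD_wall {l : List String} {n : Nat} (h : l.getD n "" = "1") : l.getD n "1" = "1" := by
  by_cases hn : n < l.length
  · rw [List.getD_eq_getElem?_getD, List.getElem?_eq_getElem hn] at h ⊢
    exact h
  · rw [List.getD_eq_getElem?_getD, List.getElem?_eq_none (by omega)] at h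
    exact absurd h (by decide)

theorem cellD_wall (lst : List (List String)) (i j : Int) (hi : 0 ≤ i) (hj : 0 ≤ j)
    (h : (lst.getD i.toNat []).getD j.toNat "" = "1") : cellD lst i j = "1" := by
  unfold cellD
  rw [if_pos ⟨hi, hj⟩]
  exact getD_wall h

theorem pushes_nil (lst : List (List String)) (v2 : List (List Int)) (ci cj : Int)
    (h : ∀ d ∈ dirsB, inb (ci + d.1) (cj + d.2) = true → cellD lst (ci + d.1) (cj + d.2) = "1") :
    pushes lst v2 ci cj = [] := by
  rw [List.eq_nil_iff_forall_not_mem]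
  intro w hw
  rw [mem_pushes] at hw
  obtain ⟨d, hd, rfl, hb, _, hc⟩ := hw
  exact hc (h d hd hb)

theorem dfsDirs_stuck (gi gj : Int) (lst : List (List String)) (f : Nat) (i j : Int)
    (v : List (List Int)) : ∀ ds : List (Int × Int),
    (∀ d ∈ ds, ¬(inb (i + d.1) (j + d.2) = true ∧ vget v (i + d.1) (j + d.2) = 0 ∧
      cellD lst (i + d.1) (j + d.2) ≠ "1")) →
    dfsDirs gi gj lst f i j ds v = (false, v) := by
  intro ds
  induction ds with
  | nil => intro _; rw [dfsDirs]
  | cons hd tl ih =>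
    obtain ⟨p, q⟩ := hd
    intro h
    rw [dfsDirs, if_neg (h (p, q) List.mem_cons_self)]
    exact ih (fun d hd2 => h d (List.mem_cons_of_mem _ hd2))

theorem dfsCell_stuck (gi gj : Int) (lst : List (List String)) (f : Nat) (i j : Int)
    (v : List (List Int)) (hne : ¬(i = gi ∧ j = gj))
    (hw : ∀ d ∈ dirsB, inb (i + d.1) (j + d.2) = true → cellD lst (i + d.1) (j + d.2) = "1") :
    dfsCell gi gj lst (f + 1) i j v = (false, vset v i j) := by
  rw [dfsCell, if_neg hne]
  exact dfsDirs_stuck gi gj lst f i j (vset v i j) dirsB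
    (fun d hd hc => hc.2.2 (hw d hd hc.1))

theorem bfsB_values (si sj gi gj : Int) (lst : List (List String)) :
    bfs_alt si sj gi gj lst = 0 ∨ bfs_alt si sj gi gj lst = 1 := by
  unfold bfs_alt
  split
  · exact Or.inr rfl
  · split
    · exact Or.inr rfl
    · exact Or.inl rfl

-- ===== VERDICT (by name: the statement is the Claim_ definition above) =====
theorem bfs_spec : Claim_equal_bfs := by
  intro si sj gi gj lst _ hpre
  unfold Spec_bfs
  by_cases hsg : si = gi ∧ sj = gj
  · have hA : bfs si sj gi gj lst = 1 := by
      unfold bfs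
      rw [bfsLoop]
      rw [if_pos hsg]
    have hB : bfs_alt si sj gi gj lst = 1 := by
      unfold bfs_alt
      rw [if_pos hsg]
    rw [hA, hB]
  · rcases hpre with h | hstuck | hfull
    · exact absurd h hsg
    · obtain ⟨_, _, _, _, hwalls⟩ := hstuck
      have hwall' : ∀ d ∈ dirsB, inb (si + d.1) (sj + d.2) = true →
          cellD lst (si + d.1) (sj + d.2) = "1" := by
        intro d hd hb
        have hnn := inb_nonneg hb
        exact cellD_wall lst _ _ hnn.1 hnn.2 (hwalls d hd hb)
      have hA : bfs si sj gi gj lst = 0 := by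
        unfold bfs
        rw [bfsLoop, if_neg hsg, pushes_nil lst _ si sj hwall', List.nil_append, bfsLoop]
      have hB : bfs_alt si sj gi gj lst = 0 := by
        unfold bfs_alt
        rw [if_neg hsg]
        rw [show (257 : Nat) = 256 + 1 from rfl,
          dfsCell_stuck gi gj lst 256 si sj initV hsg hwall']
        rfl
      rw [hA, hB]
    · have hs : inb si sj = true := hfull.1
      have hA := bfsA_iff si sj gi gj lst hs hsg
      have hB := bfsB_iff si sj gi gj lst hs hsg
      rcases bfsLoop_values gi gj lst [(si, sj)] initV with h0 | h1
      · have hA0 : bfs si sj gi gj lst = 0 := h0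
        rcases bfsB_values si sj gi gj lst with hb0 | hb1
        · rw [hA0, hb0]
        · have := hA.mpr (hB.mp hb1)
          rw [hA0] at this
          exact absurd this (by norm_num)
      · have hA1 : bfs si sj gi gj lst = 1 := h1
        rw [hA1, hB.mpr (hA.mp hA1)]
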